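-- pv_equiv track=rewrite | github.com/leosch1/VibeRadar | backend/api/utils/location.py | _is_in_sea
-- ===== SOURCE A (Python) =====
-- from typing import Optional, Dict, Any
--
-- def _is_in_sea(address: Dict[str, Any]) -> bool:
--     """
--     Check if the location is in the sea based on address components.
--
--     Args:
--         address (Dict): The address components from geopy
--
--     Returns:
--         bool: True if location is in the sea, False otherwise
--     """
--     # Check for water-related address components
--     water_indicators = [
--         'ocean', 'sea', 'bay', 'gulf', 'marine', 'coastal', 'offshore'
--     ]
--
--     # Check all address components for water indicators
--     for value in address.values():
--         if isinstance(value, str):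
--             value_lower = value.lower()
--             if any(indicator in value_lower for indicator in water_indicators):
--                 return True
--
--     return False
-- ===== SOURCE B (Python) =====
-- def _is_in_sea(address):
--     """Build one combined lowercase text from all string address components
--     (newline-separated, so no keyword can span two values), then scan it once
--     per indicator."""
--     water_indicators = [
--         'ocean', 'sea', 'bay', 'gulf', 'marine', 'coastal', 'offshore'
--     ]
--     combined = "\n".join(v.lower() for v in address.values() if isinstance(v, str))
--     return any(indicator in combined for indicator in water_indicators)
-- ===== Notes on version B (the rewrite author's own statement) =====
-- stated objective: faster
-- what changed: Replaces the per-value early-return loop with nested substring scans by a build-then-scan shape: join all lowercased values into one newline-separated string once, then test each indicator's membership in that single string.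
import Mathlib
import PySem

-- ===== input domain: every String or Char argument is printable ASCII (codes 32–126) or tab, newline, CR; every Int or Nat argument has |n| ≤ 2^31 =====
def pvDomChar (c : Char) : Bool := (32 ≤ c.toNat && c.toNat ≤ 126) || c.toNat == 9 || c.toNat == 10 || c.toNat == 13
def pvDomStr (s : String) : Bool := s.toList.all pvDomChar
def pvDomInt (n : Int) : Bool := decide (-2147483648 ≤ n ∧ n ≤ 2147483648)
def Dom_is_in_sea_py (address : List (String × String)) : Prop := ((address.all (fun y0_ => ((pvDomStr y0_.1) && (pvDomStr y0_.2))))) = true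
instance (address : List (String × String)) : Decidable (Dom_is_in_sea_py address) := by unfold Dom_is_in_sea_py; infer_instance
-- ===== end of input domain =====

-- A = nested per-value early-return scan; B = join-all-values-then-single-scan per indicator (alternative shape, same results).


-- ===== PORT A =====
-- water_indicators literal of A
def waterIndicatorsA : List String := ["ocean", "sea", "bay", "gulf", "marine", "coastal", "offshore"]

-- the 'for value in address.values(): …' loop with its early return; values are typed String,
-- so 'isinstance(value, str)' is always true under the type convention
def isInSeaLoopA : List (String × String) → Bool
  | [] => false
  | (_, v) :: rest =>
      let valueLower := PySem.Str.lower v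
      if waterIndicatorsA.any (fun indicator => PySem.Str.isIn indicator valueLower) then
        true
      else
        isInSeaLoopA rest

def is_in_sea_py (address : List (String × String)) : Bool :=
  isInSeaLoopA address

-- ===== PORT B =====
-- water_indicators literal of B
def waterIndicatorsB : List String := ["ocean", "sea", "bay", "gulf", "marine", "coastal", "offshore"]

def is_in_sea_py_alt (address : List (String × String)) : Bool :=
  let combined := PySem.Str.join "\n" (address.map (fun p => PySem.Str.lower p.2))
  waterIndicatorsB.any (fun indicator => PySem.Str.isIn indicator combined)

-- ===== PRECONDITION & SPEC =====
def Spec_is_in_sea_py (address : List (String × String)) (out : Bool) : Prop := out = is_in_sea_py_alt address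
instance (address : List (String × String)) (out : Bool) : Decidable (Spec_is_in_sea_py address out) := by unfold Spec_is_in_sea_py; infer_instance

-- ===== CLAIM (what is proved, stated in full; the proofs are below) =====
def Claim_equal_is_in_sea_py : Prop := ∀ (address : List (String × String)), Dom_is_in_sea_py address → Spec_is_in_sea_py address (is_in_sea_py address)

-- ===== LEMMAS AND PROOFS =====

-- a pattern avoiding c that occurs in a ++ c :: b occurs entirely in a or entirely in b
lemma infix_append_cons_of_not_mem {sub a b : List Char} {c : Char} (hc : c ∉ sub)
    (h : sub <:+: a ++ c :: b) : sub <:+: a ∨ sub <:+: b := by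
  obtain ⟨s, t, heq⟩ := h
  by_cases h1 : s.length + sub.length ≤ a.length
  · left
    have hj : s.length ≤ a.length := by omega
    have hdrop : sub ++ t = a.drop s.length ++ c :: b := by
      have := congrArg (List.drop s.length) heq
      simpa [List.drop_append_of_le_length hj, List.append_assoc] using this
    have hlen : sub.length ≤ (a.drop s.length).length := by simp; omega
    have hpre : sub <+: a.drop s.length := by
      have h0 := congrArg (List.take sub.length) hdrop
      rw [List.take_append_of_le_length hlen, List.take_left' rfl] at h0
      exact List.prefix_iff_eq_take.mpr h0
    exact hpre.isInfix.trans (List.drop_suffix s.length a).isInfix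
  · by_cases h2 : a.length + 1 ≤ s.length
    · right
      have hdrop : sub ++ t = b.drop (s.length - (a.length + 1)) := by
        have h0 := congrArg (List.drop s.length) heq
        rw [List.append_assoc, List.drop_left] at h0
        rw [List.drop_append, List.drop_eq_nil_of_le (show a.length ≤ s.length by omega),
          List.nil_append] at h0
        obtain ⟨k, hk⟩ : ∃ k, s.length - a.length = k + 1 := ⟨s.length - a.length - 1, by omega⟩
        rw [hk, List.drop_succ_cons] at h0
        rw [h0]
        congr 1
        omega
      have hpre : sub <+: b.drop (s.length - (a.length + 1)) := ⟨t, hdrop⟩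
      exact hpre.isInfix.trans (List.drop_suffix _ b).isInfix
    · exfalso
      have hj : s.length ≤ a.length := by omega
      have hdrop : sub ++ t = a.drop s.length ++ c :: b := by
        have := congrArg (List.drop s.length) heq
        simpa [List.drop_append_of_le_length hj, List.append_assoc] using this
      have hk : a.length - s.length < sub.length := by omega
      have hget : (sub ++ t)[a.length - s.length]'(by rw [List.length_append]; omega) =
          (a.drop s.length ++ c :: b)[a.length - s.length]'(by
            simp only [List.length_append, List.length_drop, List.length_cons]; omega) := by
        simp only [hdrop]
      rw [List.getElem_append_left (by simpa using hk)] at hget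
      rw [List.getElem_append_right (by simp only [List.length_drop]; omega)] at hget
      simp at hget
      exact hc (hget ▸ List.getElem_mem _)

-- a nonempty pattern avoiding the separator char is an infix of the intercalation iff it is an infix of some part
lemma infix_intercalate_iff {sub : List Char} {c : Char} (parts : List (List Char))
    (hne : sub ≠ []) (hc : c ∉ sub) :
    sub <:+: [c].intercalate parts ↔ ∃ p ∈ parts, sub <:+: p := by
  induction parts with
  | nil =>
    rw [show [c].intercalate ([] : List (List Char)) = [] from rfl]
    constructor
    · intro h
      exact absurd (List.eq_nil_of_infix_nil h) hne
    · rintro ⟨p, hp, -⟩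
      simp at hp
  | cons p ps ih =>
    cases ps with
    | nil =>
      simp [List.intercalate, List.intersperse]
    | cons q qs =>
      rw [show [c].intercalate (p :: q :: qs) = p ++ c :: [c].intercalate (q :: qs) by
        simp [List.intercalate, List.intersperse]]
      constructor
      · intro h
        rcases infix_append_cons_of_not_mem hc h with h' | h'
        · exact ⟨p, by simp, h'⟩
        · obtain ⟨r, hr, hr'⟩ := ih.mp h'
          exact ⟨r, by simp at hr ⊢; tauto, hr'⟩
      · rintro ⟨r, hr, hr'⟩
        simp at hr
        rcases hr with rfl | hr
        · exact hr'.trans ⟨[], c :: [c].intercalate (q :: qs), by simp⟩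
        · exact (ih.mpr ⟨r, by simpa using hr, hr'⟩).trans ⟨p ++ [c], [], by simp⟩

-- A's early-return loop is an 'any' over the values
lemma loopA_eq_any (address : List (String × String)) :
    isInSeaLoopA address =
      address.any (fun p => waterIndicatorsA.any
        (fun indicator => PySem.Str.isIn indicator (PySem.Str.lower p.2))) := by
  induction address with
  | nil => rfl
  | cons hd tl ih =>
    obtain ⟨k, v⟩ := hd
    rw [List.any_cons]
    show (if waterIndicatorsA.any (fun indicator => PySem.Str.isIn indicator (PySem.Str.lower v)) then true
          else isInSeaLoopA tl) =
        (waterIndicatorsA.any (fun indicator => PySem.Str.isIn indicator (PySem.Str.lower v)) ||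
          tl.any (fun p => waterIndicatorsA.any
            (fun indicator => PySem.Str.isIn indicator (PySem.Str.lower p.2))))
    split_ifs with h
    · rw [h, Bool.true_or]
    · rw [Bool.not_eq_true] at h
      rw [h, Bool.false_or, ih]

-- every indicator literal is nonempty and newline-free
lemma indicators_ok : ∀ s ∈ waterIndicatorsB, s.toList ≠ [] ∧ '\n' ∉ s.toList := by decide

-- per indicator: membership in the joined text is membership in some value
lemma isIn_combined_iff (address : List (String × String)) (indicator : String)
    (hne : indicator.toList ≠ []) (hc : '\n' ∉ indicator.toList) :
    PySem.Str.isIn indicator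
        (PySem.Str.join "\n" (address.map (fun p => PySem.Str.lower p.2))) = true ↔
      ∃ p ∈ address, PySem.Str.isIn indicator (PySem.Str.lower p.2) = true := by
  rw [PySem.Str.isIn_iff_infix, PySem.Str.toList_join]
  rw [show ("\n" : String).toList = ['\n'] from by decide]
  rw [show PySem.Chars.join ['\n'] ((address.map (fun p => PySem.Str.lower p.2)).map String.toList) =
      [('\n' : Char)].intercalate ((address.map (fun p => PySem.Str.lower p.2)).map String.toList) from rfl]
  rw [infix_intercalate_iff _ hne hc]
  constructor
  · rintro ⟨q, hq, hinf⟩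
    simp only [List.mem_map] at hq
    obtain ⟨x, ⟨p, hp, rfl⟩, rfl⟩ := hq
    exact ⟨p, hp, (PySem.Str.isIn_iff_infix _ _).mpr hinf⟩
  · rintro ⟨p, hp, hin⟩
    exact ⟨(PySem.Str.lower p.2).toList,
      List.mem_map.mpr ⟨PySem.Str.lower p.2, List.mem_map.mpr ⟨p, hp, rfl⟩, rfl⟩,
      (PySem.Str.isIn_iff_infix _ _).mp hin⟩

-- ===== VERDICT (by name: the statement is the Claim_ definition above) =====
theorem is_in_sea_py_spec : Claim_equal_is_in_sea_py := by
  intro address _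
  unfold Spec_is_in_sea_py is_in_sea_py is_in_sea_py_alt
  rw [loopA_eq_any, Bool.eq_iff_iff]
  simp only [List.any_eq_true]
  constructor
  · rintro ⟨p, hp, ind, hind, hin⟩
    exact ⟨ind, hind, (isIn_combined_iff address ind (indicators_ok ind hind).1
      (indicators_ok ind hind).2).mpr ⟨p, hp, hin⟩⟩
  · rintro ⟨ind, hind, hin⟩
    obtain ⟨p, hp, h⟩ := (isIn_combined_iff address ind (indicators_ok ind hind).1
      (indicators_ok ind hind).2).mp hin
    exact ⟨p, hp, ind, hind, h⟩
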